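-- pv_equiv track=rewrite | github.com/FilippoKubler/zkHTTP3 | middlebox/capture.py | get_tail_minus_36
-- ===== SOURCE A (Python) =====
-- def get_tail_minus_36(transcript: str) -> str:
--
--     output              = ''
--
--     length              = int( len(transcript) / 2 )
--     num_whole_blocks    = int( ( length - 36 ) / 64 )
--     tail_len            = length - num_whole_blocks * 64
--
--     for i in range(0, tail_len):
--         j = num_whole_blocks * 64 + i
--         output += transcript[2*j : (2*j) + 2]
--
--     return output
-- ===== SOURCE B (Python) =====
-- def get_tail_minus_36(transcript: str) -> str:
--     length = len(transcript) // 2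
--     num_whole_blocks = max(0, (length - 36) // 64)
--     return transcript[2 * num_whole_blocks * 64 : 2 * length]
-- ===== Notes on version B (the rewrite author's own statement) =====
-- stated objective: simpler
-- what changed: Replaces the character-pair concatenation loop with a single closed-form slice transcript[2*num_whole_blocks*64 : 2*length], computing num_whole_blocks as max(0,(length-36)//64) to reproduce int()'s truncation toward zero on short inputs.
import Mathlib
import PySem

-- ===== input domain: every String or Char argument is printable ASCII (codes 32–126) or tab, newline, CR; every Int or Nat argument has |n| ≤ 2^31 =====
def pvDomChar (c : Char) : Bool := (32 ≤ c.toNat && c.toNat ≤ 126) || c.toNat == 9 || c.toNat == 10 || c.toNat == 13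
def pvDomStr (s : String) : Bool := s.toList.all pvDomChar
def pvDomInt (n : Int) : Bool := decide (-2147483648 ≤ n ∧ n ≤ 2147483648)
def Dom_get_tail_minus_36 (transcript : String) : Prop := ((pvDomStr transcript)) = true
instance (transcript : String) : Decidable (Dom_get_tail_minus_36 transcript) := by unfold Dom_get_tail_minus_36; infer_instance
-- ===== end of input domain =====

-- B replaces A's per-character-pair concatenation loop with a single closed-form slice (simpler).


-- ===== PORT A =====
-- int(x / y) is PySem.Int.truncdiv (exact where the float quotient is, i.e. on the whole tested domain)
def get_tail_minus_36 (transcript : String) : String :=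
  let output : String := ""
  let length : Int := PySem.Int.truncdiv (PySem.Str.len transcript) 2
  let num_whole_blocks : Int := PySem.Int.truncdiv (length - 36) 64
  let tail_len : Int := length - num_whole_blocks * 64
  (PySem.List.pyRange 0 tail_len 1).foldl
    (fun output i =>
      let j := num_whole_blocks * 64 + i
      output ++ PySem.Str.slice transcript (some (2 * j)) (some (2 * j + 2)))
    output

-- ===== PORT B =====
def get_tail_minus_36_alt (transcript : String) : String :=
  let length : Int := PySem.Int.floordiv (PySem.Str.len transcript) 2
  let num_whole_blocks : Int := max 0 (PySem.Int.floordiv (length - 36) 64)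
  PySem.Str.slice transcript (some (2 * num_whole_blocks * 64)) (some (2 * length))

-- ===== PRECONDITION & SPEC =====
def Spec_get_tail_minus_36 (transcript : String) (out : String) : Prop := out = get_tail_minus_36_alt transcript
instance (transcript : String) (out : String) : Decidable (Spec_get_tail_minus_36 transcript out) := by unfold Spec_get_tail_minus_36; infer_instance

-- ===== CLAIM (what is proved, stated in full; the proofs are below) =====
def Claim_equal_get_tail_minus_36 : Prop := ∀ (transcript : String), Dom_get_tail_minus_36 transcript → Spec_get_tail_minus_36 transcript (get_tail_minus_36 transcript)

-- ===== LEMMAS AND PROOFS =====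

-- A's loop appends the pair slices t[2c:2c+2], t[2(c+1):2(c+1)+2], …; together they are one slice.
lemma foldA_eq (t : String) (c : Int) (hc : 0 ≤ c) :
    ∀ (n : Nat) (init : String),
      ((PySem.List.pyRange 0 (n : Int) 1).foldl
        (fun out i => out ++ PySem.Str.slice t (some (2 * (c + i))) (some (2 * (c + i) + 2))) init).toList
      = init.toList ++ (t.toList.drop (2 * c).toNat).take (2 * n) := by
  intro n
  induction n with
  | zero => intro init; simp [PySem.List.pyRange_one_eq_nil]
  | succ n ih =>
    intro init
    have hcast : ((n + 1 : Nat) : Int) = (n : Int) + 1 := by push_cast; ring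
    rw [hcast, PySem.List.pyRange_one_succ_right (by positivity), List.foldl_append]
    simp only [List.foldl_cons, List.foldl_nil]
    rw [String.toList_append, ih]
    rw [PySem.Str.toList_slice, PySem.Chars.slice_eq_listSlice,
        PySem.List.slice_toNat _ (by omega) (by omega)]
    have h1 : (2 * (c + (n : Int)) + 2).toNat - (2 * (c + (n : Int))).toNat = 2 := by omega
    have h2 : (2 * (c + (n : Int))).toNat = (2 * c).toNat + 2 * n := by omega
    rw [h1, h2, List.append_assoc]
    congr 1
    rw [← List.drop_drop, ← List.take_add]
    congr 1
lemma tdiv_small_neg (k : Int) (h0 : -64 < k) (h1 : k ≤ 0) : k.tdiv 64 = 0 := by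
  have h : k = -(-k) := by omega
  rw [h, Int.neg_tdiv, Int.tdiv_eq_zero_of_lt (by omega) (by omega), neg_zero]

-- ===== VERDICT (by name: the statement is the Claim_ definition above) =====
theorem get_tail_minus_36_spec : Claim_equal_get_tail_minus_36 := by
  intro t _
  unfold Spec_get_tail_minus_36 get_tail_minus_36 get_tail_minus_36_alt
  simp only [PySem.Str.len]
  set L : Nat := t.toList.length with hL
  -- both length computations are ↑(L / 2)
  have hlen : PySem.Int.truncdiv (L : Int) 2 = ((L / 2 : Nat) : Int) := by
    simp only [PySem.Int.truncdiv]
    rw [Int.tdiv_eq_ediv_of_nonneg (by positivity)]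
    omega
  have hlen' : PySem.Int.floordiv (L : Int) 2 = ((L / 2 : Nat) : Int) := by
    rw [PySem.Int.floordiv_eq_ediv_of_pos (by omega)]; omega
  -- both block counts are ↑q, q := (L/2 - 36)/64  (Nat subtraction: 0 below 36, as int() truncates to 0)
  set q : Nat := (L / 2 - 36) / 64 with hq
  have hfd : PySem.Int.floordiv (((L / 2 : Nat) : Int) - 36) 64 = (((L / 2 : Nat) : Int) - 36) / 64 :=
    PySem.Int.floordiv_eq_ediv_of_pos (by omega)
  have hnbA : PySem.Int.truncdiv (((L / 2 : Nat) : Int) - 36) 64 = (q : Int) := by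
    by_cases h36 : 36 ≤ L / 2
    · simp only [PySem.Int.truncdiv]
      rw [Int.tdiv_eq_ediv_of_nonneg (by omega)]
      omega
    · have : q = 0 := by omega
      rw [this, PySem.Int.truncdiv, tdiv_small_neg _ (by omega) (by omega)]
      rfl
  have hnbB : max 0 (PySem.Int.floordiv (((L / 2 : Nat) : Int) - 36) 64) = (q : Int) := by
    rw [hfd]
    by_cases h36 : 36 ≤ L / 2 <;> omega
  have hq64 : q * 64 ≤ L / 2 := by
    by_cases h36 : 36 ≤ L / 2
    · have := Nat.div_mul_le_self (L / 2 - 36) 64; omega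
    · have : q = 0 := by omega
      omega
  simp only [hlen, hlen', hnbA, hnbB]
  -- the loop bound is the Nat  L/2 - q*64
  have htail : ((L / 2 : Nat) : Int) - (q : Int) * 64 = ((L / 2 - q * 64 : Nat) : Int) := by omega
  apply String.toList_inj.mp
  rw [htail, foldA_eq t ((q : Int) * 64) (by positivity) (L / 2 - q * 64) ""]
  rw [PySem.Str.toList_slice, PySem.Chars.slice_eq_listSlice,
      PySem.List.slice_toNat _ (by positivity) (by positivity)]
  have hb1 : (2 * (q : Int) * 64).toNat = (2 * ((q : Int) * 64)).toNat := by omega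
  rw [hb1]
  simp only [String.toList_empty, List.nil_append]
  congr 1
  omega
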